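-- pv_equiv track=rewrite | github.com/subhamoymahajan/in-silico-microscopy | siliscopy/prop.py | simp_equiv
-- ===== SOURCE A (Python) =====
-- def simp_equiv(equiv):
--     """ Simplifies an equivalnce dictionary
--
--     Maxes sure a->b is such that b is the lowest possible number.
--     """
--     for key in equiv:
--         foo=equiv[key]
--         while True: #iteratively, if a->b and b->c, then a->c
--             if foo in equiv:
--                 foo=equiv[foo]
--             else:
--                 break
--         equiv[key]=foo
--     return equiv
-- ===== SOURCE B (Python) =====
-- def simp_equiv(equiv):
--     """Resolve each key to its chain's terminal value (memoized path compression).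
--
--     Mutates equiv in place (same side effect as the original) and returns it.
--     """
--     cache = {}
--     for key in equiv:
--         x = equiv[key]
--         path = []
--         while x in equiv and x not in cache:
--             path.append(x)
--             x = equiv[x]
--         term = cache[x] if x in cache else x
--         for p in path:
--             cache[p] = term
--         cache[key] = term
--         equiv[key] = term
--     return equiv
-- ===== Notes on version B (the rewrite author's own statement) =====
-- stated objective: alternative
-- what changed: Instead of re-chasing the full pointer chain from scratch for every key, B keeps a memo cache and path-compresses: each chain node is walked once, its terminal cached, and later chains stop at any cached node (worst-case O(n) vs A's O(n^2) on long chains, though not measurably faster on the random inputs a timing run uses).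
import Mathlib
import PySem

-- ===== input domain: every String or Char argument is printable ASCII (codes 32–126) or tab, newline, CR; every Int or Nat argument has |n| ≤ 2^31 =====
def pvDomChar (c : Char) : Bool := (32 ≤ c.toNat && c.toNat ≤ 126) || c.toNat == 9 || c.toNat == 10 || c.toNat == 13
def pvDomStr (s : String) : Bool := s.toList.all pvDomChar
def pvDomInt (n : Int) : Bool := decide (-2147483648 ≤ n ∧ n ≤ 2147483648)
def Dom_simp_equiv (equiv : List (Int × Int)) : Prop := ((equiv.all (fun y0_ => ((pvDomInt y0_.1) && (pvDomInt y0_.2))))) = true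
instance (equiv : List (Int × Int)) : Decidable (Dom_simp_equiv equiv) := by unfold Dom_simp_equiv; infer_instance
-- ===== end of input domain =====

-- B replaces A's per-key full chain re-chase by a memo cache with path compression (each
-- chain node is resolved once); equivalence is about the RETURN value — both Pythons also
-- mutate the argument dict in place, in the same way.

-- ===== PORT A =====
-- the 'while True: if foo in equiv: foo=equiv[foo] else: break' loop; fuel makes it total,
-- under Pre_ (no cycles) the fuel equiv.length+1 is never exhausted
def pvChaseA (d : PySem.Dict Int Int) : Nat → Int → Int
  | 0, foo => foo
  | fuel+1, foo =>
    match d.get? foo with          -- 'if foo in equiv: foo = equiv[foo]'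
    | some v => pvChaseA d fuel v
    | none => foo                  -- 'break'

def simp_equiv (equiv : List (Int × Int)) : List (Int × Int) :=
  let d0 := PySem.Dict.ofList equiv
  (d0.keys.foldl (fun d key =>
      d.insert key (pvChaseA d (equiv.length + 1) (d.getD key key))) d0).items

-- ===== PORT B =====
-- B's 'while x in equiv and x not in cache: path.append(x); x = equiv[x]' loop (fuel-totalised)
def pvChaseB (d cache : PySem.Dict Int Int) : Nat → Int → List Int → Int × List Int
  | 0, x, path => (x, path)
  | fuel+1, x, path =>
    if d.contains x && !(cache.contains x) then
      pvChaseB d cache fuel (d.getD x x) (path ++ [x])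
    else (x, path)

-- B's loop body: resolve equiv[key], cache every node of the walked path and the key itself
def pvStepB (fuel : Nat) (st : PySem.Dict Int Int × PySem.Dict Int Int) (key : Int) :
    PySem.Dict Int Int × PySem.Dict Int Int :=
  let r := pvChaseB st.1 st.2 fuel (st.1.getD key key) []
  let term := st.2.getD r.1 r.1                              -- 'cache[x] if x in cache else x'
  let cache := (r.2.foldl (fun c p => c.insert p term) st.2).insert key term
  (st.1.insert key term, cache)

def simp_equiv_alt (equiv : List (Int × Int)) : List (Int × Int) :=
  let d0 := PySem.Dict.ofList equiv
  ((d0.keys.foldl (pvStepB (equiv.length + 1)) (d0, PySem.Dict.empty)).1).items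

-- ===== PRECONDITION & SPEC =====
-- one successor step of the equivalence mapping (identity outside the keys)
def pvStepD (d0 : PySem.Dict Int Int) (x : Int) : Int := d0.getD x x

-- Pre_ excludes exactly the cyclic mappings (e.g. {1: 1}), on which Python A's
-- 'while True' chain chase never terminates: acyclicity of the finite successor map is
-- equivalent to every chain leaving the key set within equiv.length steps (and staying out).
def Pre_simp_equiv (equiv : List (Int × Int)) : Prop :=
  ∀ k ∈ (PySem.Dict.ofList equiv).keys,
    (pvStepD (PySem.Dict.ofList equiv))^[equiv.length] k ∉ (PySem.Dict.ofList equiv).keys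
instance (equiv : List (Int × Int)) : Decidable (Pre_simp_equiv equiv) := by
  unfold Pre_simp_equiv; infer_instance

def pvWitness_simp_equiv : (List (Int × Int)) := [(3, 2), (2, 1), (7, 5)]

def Spec_simp_equiv (equiv : List (Int × Int)) (out : List (Int × Int)) : Prop := out = simp_equiv_alt equiv
instance (equiv : List (Int × Int)) (out : List (Int × Int)) : Decidable (Spec_simp_equiv equiv out) := by unfold Spec_simp_equiv; infer_instance

-- ===== CLAIM (what is proved, stated in full; the proofs are below) =====
def Claim_equal_simp_equiv : Prop := ∀ (equiv : List (Int × Int)), Dom_simp_equiv equiv → Pre_simp_equiv equiv → Spec_simp_equiv equiv (simp_equiv equiv)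

-- ===== LEMMAS AND PROOFS =====

-- the terminal of the chain starting at x (n+1 iterations; n bounds the chain length under Pre_)
def pvTerm (d0 : PySem.Dict Int Int) (n : Nat) (x : Int) : Int := (pvStepD d0)^[n+1] x

-- invariant of the mutated equiv dict: each value is still the original one, or already its terminal
def pvInvD (d0 : PySem.Dict Int Int) (n : Nat) (d : PySem.Dict Int Int) : Prop :=
  d.keys = d0.keys ∧
  ∀ x v, d.get? x = some v → v = pvStepD d0 x ∨ (v = pvTerm d0 n x ∧ v ∉ d0.keys)

-- invariant of B's cache: every entry maps a key to its terminal
def pvInvC (d0 : PySem.Dict Int Int) (n : Nat) (c : PySem.Dict Int Int) : Prop :=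
  ∀ x t, c.get? x = some t → x ∈ d0.keys ∧ t = pvTerm d0 n x

-- loop invariant: after processing the keys in P, the items are the original ones with
-- the processed keys' values replaced by their terminals
def pvItems (d0 : PySem.Dict Int Int) (n : Nat) (P : List Int) (d : PySem.Dict Int Int) : Prop :=
  d.items = d0.items.map (fun p => if p.1 ∈ P then (p.1, pvTerm d0 n p.1) else p)

theorem pvStep_of_not_mem (d0 : PySem.Dict Int Int) (x : Int) (hx : x ∉ d0.keys) :
    pvStepD d0 x = x := by
  apply PySem.Dict.getD_of_not_contains
  rw [← Bool.not_eq_true, PySem.Dict.contains_iff_mem_keys]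
  exact hx

theorem pvIter_of_not_mem (d0 : PySem.Dict Int Int) (x : Int) (hx : x ∉ d0.keys) (g : Nat) :
    (pvStepD d0)^[g] x = x :=
  Function.iterate_fixed (pvStep_of_not_mem d0 x hx) g

theorem pvIter_stable (d0 : PySem.Dict Int Int) (x : Int) (f g : Nat)
    (hx : (pvStepD d0)^[f] x ∉ d0.keys) (hfg : f ≤ g) :
    (pvStepD d0)^[g] x = (pvStepD d0)^[f] x := by
  have hg : g = (g - f) + f := by omega
  rw [hg, Function.iterate_add_apply]
  exact pvIter_of_not_mem d0 _ hx _

theorem pvStep_of_get? (d0 : PySem.Dict Int Int) (x v : Int) (h : d0.get? x = some v) :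
    pvStepD d0 x = v := by
  simp [pvStepD, PySem.Dict.getD_eq_get?_getD, h]

theorem pvMem_keys_of_get? (d : PySem.Dict Int Int) (x v : Int) (h : d.get? x = some v) :
    x ∈ d.keys := by
  by_contra hx
  rw [← PySem.Dict.get?_eq_none_iff_not_mem_keys] at hx
  simp [hx] at h

theorem pvGet?_of_mem_keys (d : PySem.Dict Int Int) (x : Int) (h : x ∈ d.keys) :
    ∃ v, d.get? x = some v := by
  rcases hh : d.get? x with _ | v
  · rw [PySem.Dict.get?_eq_none_iff_not_mem_keys] at hh; exact absurd h hh
  · exact ⟨v, rfl⟩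

theorem pvTerm_eq_iter_n (d0 : PySem.Dict Int Int) (n : Nat) (x : Int)
    (hx : (pvStepD d0)^[n] x ∉ d0.keys) : pvTerm d0 n x = (pvStepD d0)^[n] x :=
  pvIter_stable d0 x n (n+1) hx (by omega)

theorem pvTerm_not_mem (d0 : PySem.Dict Int Int) (n : Nat) (x : Int)
    (hx : (pvStepD d0)^[n] x ∉ d0.keys) : pvTerm d0 n x ∉ d0.keys := by
  rw [pvTerm_eq_iter_n d0 n x hx]; exact hx

theorem pvTerm_step (d0 : PySem.Dict Int Int) (n : Nat) (x : Int)
    (hx : (pvStepD d0)^[n] x ∉ d0.keys) :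
    pvTerm d0 n (pvStepD d0 x) = pvTerm d0 n x := by
  have h1 : pvTerm d0 n (pvStepD d0 x) = (pvStepD d0)^[n+2] x :=
    (Function.iterate_succ_apply (pvStepD d0) (n+1) x).symm
  rw [h1, pvTerm, pvIter_stable d0 x n (n+2) hx (by omega),
      pvIter_stable d0 x n (n+1) hx (by omega)]

theorem pvIter_step_not_mem (d0 : PySem.Dict Int Int) (n : Nat) (x : Int)
    (hx : (pvStepD d0)^[n] x ∉ d0.keys) :
    (pvStepD d0)^[n] (pvStepD d0 x) ∉ d0.keys := by
  rw [← Function.iterate_succ_apply, pvIter_stable d0 x n (n+1) hx (by omega)]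
  exact hx

theorem pvChaseA_of_not_mem (d : PySem.Dict Int Int) (m : Nat) (x : Int) (hx : x ∉ d.keys) :
    pvChaseA d m x = x := by
  cases m with
  | zero => rfl
  | succ m =>
    rw [← PySem.Dict.get?_eq_none_iff_not_mem_keys] at hx
    simp [pvChaseA, hx]

theorem pvChaseB_of_not_mem (d c : PySem.Dict Int Int) (m : Nat) (x : Int) (path : List Int)
    (hx : x ∉ d.keys) : pvChaseB d c m x path = (x, path) := by
  cases m with
  | zero => rfl
  | succ m =>
    have hc : d.contains x = false := by
      rw [← Bool.not_eq_true, PySem.Dict.contains_iff_mem_keys]; exact hx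
    simp [pvChaseB, hc]

-- the chain chase inside the (partially compressed) dict d returns the terminal w.r.t. d0
theorem pvChaseA_eq (d0 : PySem.Dict Int Int) (n : Nat) (d : PySem.Dict Int Int)
    (hI : pvInvD d0 n d) :
    ∀ m f x, (pvStepD d0)^[f] x ∉ d0.keys → f < m → m ≤ n + 1 →
      pvChaseA d m x = pvTerm d0 n x := by
  intro m
  induction m with
  | zero => intro f x _ hf _; omega
  | succ m ih =>
    intro f x hx hf hm
    rcases hh : d.get? x with _ | v
    · -- x not a key: chase returns x, and x is its own terminal
      have hxk : x ∉ d0.keys := by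
        rw [← hI.1]; rw [PySem.Dict.get?_eq_none_iff_not_mem_keys] at hh; exact hh
      simp [pvChaseA, hh, pvTerm, pvIter_of_not_mem d0 x hxk]
    · have hxk : x ∈ d0.keys := by rw [← hI.1]; exact pvMem_keys_of_get? d x v hh
      have hstep : pvChaseA d (m+1) x = pvChaseA d m v := by simp [pvChaseA, hh]
      have hf0 : f ≠ 0 := by
        intro h0; rw [h0] at hx; exact hx hxk
      rcases hI.2 x v hh with hv | ⟨hv, hvk⟩
      · -- v is the original successor
        subst hv
        rcases Nat.exists_eq_succ_of_ne_zero hf0 with ⟨f', rfl⟩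
        have hx' : (pvStepD d0)^[f'] (pvStepD d0 x) ∉ d0.keys := by
          rw [← Function.iterate_succ_apply]; exact hx
        have hesc : (pvStepD d0)^[n] x ∉ d0.keys := by
          rw [pvIter_stable d0 x (f'+1) n hx (by omega)]; exact hx
        rw [hstep, ih f' (pvStepD d0 x) hx' (by omega) (by omega)]
        exact pvTerm_step d0 n x hesc
      · -- v is already the terminal (a non-key): one more step returns it
        rw [hstep, pvChaseA_of_not_mem d m v (by rw [hI.1]; exact hvk), hv]

-- B's walk: the resolved value of the stopping point is the terminal, and every node
-- pushed on the path is a key with the same terminal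
theorem pvChaseB_spec (d0 : PySem.Dict Int Int) (n : Nat) (d c : PySem.Dict Int Int)
    (hI : pvInvD d0 n d) (hC : pvInvC d0 n c) :
    ∀ m f x path, (pvStepD d0)^[f] x ∉ d0.keys → f < m → m ≤ n + 1 →
      c.getD (pvChaseB d c m x path).1 (pvChaseB d c m x path).1 = pvTerm d0 n x ∧
      ∃ q, (pvChaseB d c m x path).2 = path ++ q ∧
        ∀ z ∈ q, z ∈ d0.keys ∧ pvTerm d0 n z = pvTerm d0 n x := by
  intro m
  induction m with
  | zero => intro f x path _ hf _; omega
  | succ m ih =>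
    intro f x path hx hf hm
    by_cases hxk : x ∈ d0.keys
    · rcases pvGet?_of_mem_keys d x (by rw [hI.1]; exact hxk) with ⟨v, hh⟩
      have hgd : d.getD x x = v := by simp [PySem.Dict.getD_eq_get?_getD, hh]
      have hdx : d.contains x = true := by
        rw [PySem.Dict.contains_iff_mem_keys, hI.1]; exact hxk
      by_cases hcx : ∃ t, c.get? x = some t
      · -- x already cached: walk stops, cache gives the terminal
        rcases hcx with ⟨t, hct⟩
        have hcc : c.contains x = true := by
          rw [PySem.Dict.contains_eq_isSome_get?, hct]; rfl
        have hres : pvChaseB d c (m+1) x path = (x, path) := by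
          simp [pvChaseB, hdx, hcc]
        refine ⟨?_, [], by simp [hres], by simp⟩
        rw [hres]
        simp [PySem.Dict.getD_eq_get?_getD, hct, (hC x t hct).2]
      · -- x uncached key: push x and follow its value
        have hcc : c.contains x = false := by
          rcases hcg : c.get? x with _ | t
          · rw [PySem.Dict.contains_eq_isSome_get?, hcg]; rfl
          · exact absurd ⟨t, hcg⟩ hcx
        have hres : pvChaseB d c (m+1) x path = pvChaseB d c m v (path ++ [x]) := by
          simp [pvChaseB, hdx, hcc, hgd]
        have hf0 : f ≠ 0 := by intro h0; rw [h0] at hx; exact hx hxk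
        rcases hI.2 x v hh with hv | ⟨hv, hvk⟩
        · subst hv
          rcases Nat.exists_eq_succ_of_ne_zero hf0 with ⟨f', rfl⟩
          have hx' : (pvStepD d0)^[f'] (pvStepD d0 x) ∉ d0.keys := by
            rw [← Function.iterate_succ_apply]; exact hx
          have hesc : (pvStepD d0)^[n] x ∉ d0.keys := by
            rw [pvIter_stable d0 x (f'+1) n hx (by omega)]; exact hx
          rcases ih f' (pvStepD d0 x) (path ++ [x]) hx' (by omega) (by omega) with
            ⟨ht, q', hq', hzq'⟩
          refine ⟨?_, x :: q', ?_, ?_⟩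
          · rw [hres, ht, pvTerm_step d0 n x hesc]
          · rw [hres, hq']; simp
          · intro z hz
            rcases List.mem_cons.mp hz with hz | hz
            · subst hz; exact ⟨hxk, rfl⟩
            · rcases hzq' z hz with ⟨h1, h2⟩
              exact ⟨h1, by rw [h2, pvTerm_step d0 n x hesc]⟩
        · -- value already a terminal (non-key): next check stops immediately
          have hres2 : pvChaseB d c m v (path ++ [x]) = (v, path ++ [x]) :=
            pvChaseB_of_not_mem d c m v _ (by rw [hI.1]; exact hvk)
          have hcv : c.get? v = none := by
            rcases hcg : c.get? v with _ | t
            · rfl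
            · exact absurd (hC v t hcg).1 hvk
          refine ⟨?_, [x], by rw [hres, hres2], by simp [hxk]⟩
          rw [hres, hres2, hv]
          rw [hv] at hcv
          simp [PySem.Dict.getD_eq_get?_getD, hcv]
    · -- x is not a key: both the walk and the terminal are trivial
      have hres : pvChaseB d c (m+1) x path = (x, path) :=
        pvChaseB_of_not_mem d c (m+1) x path (by rw [hI.1]; exact hxk)
      have hcx : c.get? x = none := by
        rcases hcg : c.get? x with _ | t
        · rfl
        · exact absurd (hC x t hcg).1 hxk
      refine ⟨?_, [], by simp [hres], by simp⟩
      rw [hres]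
      simp [PySem.Dict.getD_eq_get?_getD, hcx, pvTerm, pvIter_of_not_mem d0 x hxk]

theorem pvItems_keys (d0 : PySem.Dict Int Int) (n : Nat) (P : List Int)
    (d : PySem.Dict Int Int) (h : pvItems d0 n P d) : d.keys = d0.keys := by
  unfold pvItems at h
  simp only [PySem.Dict.keys, h, List.map_map]
  apply List.map_congr_left
  intro p _
  by_cases hp : p.1 ∈ P <;> simp [hp]

theorem pvItems_inv (d0 : PySem.Dict Int Int) (n : Nat) (P : List Int)
    (d : PySem.Dict Int Int) (hd0 : d0.keys.Nodup)
    (hPre : ∀ k ∈ d0.keys, (pvStepD d0)^[n] k ∉ d0.keys)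
    (h : pvItems d0 n P d) : pvInvD d0 n d := by
  have hk := pvItems_keys d0 n P d h
  refine ⟨hk, ?_⟩
  intro x v hg
  have hnd : d.keys.Nodup := by rw [hk]; exact hd0
  unfold pvItems at h
  rw [PySem.Dict.get?_eq_some_iff_mem_items d x v hnd, h, List.mem_map] at hg
  rcases hg with ⟨p, hp, hpe⟩
  by_cases hP : p.1 ∈ P
  · simp only [hP, if_pos, Prod.mk.injEq] at hpe
    obtain ⟨hx, hv⟩ := hpe
    right
    have hxk : p.1 ∈ d0.keys := by
      simp only [PySem.Dict.keys]; exact List.mem_map_of_mem hp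
    refine ⟨?_, ?_⟩
    · rw [← hv, hx]
    · rw [← hv]; exact pvTerm_not_mem d0 n p.1 (hPre p.1 hxk)
  · simp only [hP, if_false] at hpe
    left
    have : d0.get? x = some v := by
      rw [hpe] at hp; exact PySem.Dict.get?_of_mem_items d0 hp hd0
    rw [pvStep_of_get? d0 x v this]

-- reading an unprocessed key still yields the original successor
theorem pvGetD_unprocessed (d0 : PySem.Dict Int Int) (n : Nat) (P : List Int)
    (d : PySem.Dict Int Int) (hd0 : d0.keys.Nodup) (h : pvItems d0 n P d)
    (key : Int) (hk : key ∈ d0.keys) (hP : key ∉ P) :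
    d.getD key key = pvStepD d0 key := by
  rcases pvGet?_of_mem_keys d key (by rw [pvItems_keys d0 n P d h]; exact hk) with ⟨v, hv⟩
  have hmem : (key, v) ∈ d.items := by
    rw [← PySem.Dict.get?_eq_some_iff_mem_items d key v
      (by rw [pvItems_keys d0 n P d h]; exact hd0)]
    exact hv
  unfold pvItems at h
  rw [h, List.mem_map] at hmem
  rcases hmem with ⟨p, hp, hpe⟩
  by_cases hPp : p.1 ∈ P
  · simp only [hPp, if_pos, Prod.mk.injEq] at hpe
    exact absurd (hpe.1 ▸ hPp) hP
  · simp only [hPp, if_false] at hpe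
    rw [hpe] at hp
    have := PySem.Dict.get?_of_mem_items d0 hp hd0
    rw [PySem.Dict.getD_eq_get?_getD, hv, Option.getD_some, pvStep_of_get? d0 key v this]

-- inserting a key's terminal extends the processed set
theorem pvInsert_term (d0 : PySem.Dict Int Int) (n : Nat) (P : List Int)
    (d : PySem.Dict Int Int) (h : pvItems d0 n P d)
    (key : Int) (hk : key ∈ d0.keys) (hP : key ∉ P) :
    pvItems d0 n (P ++ [key]) (d.insert key (pvTerm d0 n key)) := by
  have hc : d.contains key = true := by
    rw [PySem.Dict.contains_iff_mem_keys, pvItems_keys d0 n P d h]; exact hk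
  unfold pvItems at h ⊢
  rw [PySem.Dict.items_insert_of_contains d _ hc, h, List.map_map]
  apply List.map_congr_left
  intro p _
  by_cases hPp : p.1 ∈ P
  · have hne : p.1 ≠ key := fun he => hP (he ▸ hPp)
    simp [hPp, hne]
  · by_cases hpk : p.1 = key
    · subst hpk; simp [hPp]
    · simp [hPp, hpk]

-- cache updates along the walked path preserve the cache invariant
theorem pvInvC_fold (d0 : PySem.Dict Int Int) (n : Nat) (t : Int) :
    ∀ (q : List Int) (c : PySem.Dict Int Int), pvInvC d0 n c →
      (∀ z ∈ q, z ∈ d0.keys ∧ pvTerm d0 n z = t) →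
      pvInvC d0 n (q.foldl (fun c p => c.insert p t) c) := by
  intro q
  induction q with
  | nil => intro c hC _; exact hC
  | cons z q ih =>
    intro c hC hq
    simp only [List.foldl_cons]
    apply ih
    · intro x u hx
      rw [PySem.Dict.get?_insert] at hx
      split at hx
      · rename_i hxz
        subst hxz
        rcases hq x (by simp) with ⟨h1, h2⟩
        exact ⟨h1, by rw [h2]; exact (Option.some.inj hx).symm⟩
      · exact hC x u hx
    · intro z' hz'; exact hq z' (by simp [hz'])

theorem pvInvC_insert (d0 : PySem.Dict Int Int) (n : Nat) (c : PySem.Dict Int Int)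
    (hC : pvInvC d0 n c) (key : Int) (hk : key ∈ d0.keys) :
    pvInvC d0 n (c.insert key (pvTerm d0 n key)) := by
  intro x u hx
  rw [PySem.Dict.get?_insert] at hx
  split at hx
  · rename_i hxz; subst hxz
    exact ⟨hk, (Option.some_inj.mp hx).symm⟩
  · exact hC x u hx

-- A's loop: processing the remaining keys extends the processed set
theorem pvFoldA (d0 : PySem.Dict Int Int) (n : Nat) (hd0 : d0.keys.Nodup)
    (hPre : ∀ k ∈ d0.keys, (pvStepD d0)^[n] k ∉ d0.keys) :
    ∀ (rest P : List Int) (d : PySem.Dict Int Int),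
      d0.keys = P ++ rest → pvItems d0 n P d →
      pvItems d0 n (P ++ rest)
        (rest.foldl (fun d key => d.insert key (pvChaseA d (n + 1) (d.getD key key))) d) := by
  intro rest
  induction rest with
  | nil => intro P d hsplit h; simpa using h
  | cons key rest ih =>
    intro P d hsplit h
    have hk : key ∈ d0.keys := by rw [hsplit]; simp
    have hP : key ∉ P := by
      have := hd0; rw [hsplit] at this
      rw [List.nodup_append] at this
      intro hkP
      exact this.2.2 key hkP key (List.mem_cons_self) rfl
    have hesc := hPre key hk
    have hgd := pvGetD_unprocessed d0 n P d hd0 h key hk hP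
    have hchase : pvChaseA d (n + 1) (d.getD key key) = pvTerm d0 n key := by
      rw [hgd,
        pvChaseA_eq d0 n d (pvItems_inv d0 n P d hd0 hPre h) (n+1) n (pvStepD d0 key)
          (pvIter_step_not_mem d0 n key hesc) (by omega) (by omega)]
      exact pvTerm_step d0 n key hesc
    have hnext := pvInsert_term d0 n P d h key hk hP
    simp only [List.foldl_cons, hchase]
    have := ih (P ++ [key]) (d.insert key (pvTerm d0 n key)) (by simpa using hsplit) hnext
    simpa using this

-- B's loop: same processed-items invariant, plus the cache invariant
theorem pvFoldB (d0 : PySem.Dict Int Int) (n : Nat) (hd0 : d0.keys.Nodup)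
    (hPre : ∀ k ∈ d0.keys, (pvStepD d0)^[n] k ∉ d0.keys) :
    ∀ (rest P : List Int) (d c : PySem.Dict Int Int),
      d0.keys = P ++ rest → pvItems d0 n P d → pvInvC d0 n c →
      pvItems d0 n (P ++ rest) ((rest.foldl (pvStepB (n + 1)) (d, c)).1) := by
  intro rest
  induction rest with
  | nil => intro P d c hsplit h _; simpa using h
  | cons key rest ih =>
    intro P d c hsplit h hC
    have hk : key ∈ d0.keys := by rw [hsplit]; simp
    have hP : key ∉ P := by
      have := hd0; rw [hsplit] at this
      rw [List.nodup_append] at this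
      intro hkP
      exact this.2.2 key hkP key (List.mem_cons_self) rfl
    have hesc := hPre key hk
    have hI := pvItems_inv d0 n P d hd0 hPre h
    have hgd := pvGetD_unprocessed d0 n P d hd0 h key hk hP
    rcases pvChaseB_spec d0 n d c hI hC (n+1) n (pvStepD d0 key) []
        (pvIter_step_not_mem d0 n key hesc) (by omega) (by omega) with ⟨ht, q, hq, hzq⟩
    have hterm : c.getD (pvChaseB d c (n+1) (pvStepD d0 key) []).1
        (pvChaseB d c (n+1) (pvStepD d0 key) []).1 = pvTerm d0 n key := by
      rw [ht]; exact pvTerm_step d0 n key hesc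
    have hstep : pvStepB (n + 1) (d, c) key =
        (d.insert key (pvTerm d0 n key),
         (((pvChaseB d c (n+1) (pvStepD d0 key) []).2).foldl
            (fun c p => c.insert p (pvTerm d0 n key)) c).insert key (pvTerm d0 n key)) := by
      simp only [pvStepB, hgd, hterm]
    have hC' : pvInvC d0 n
        ((((pvChaseB d c (n+1) (pvStepD d0 key) []).2).foldl
            (fun c p => c.insert p (pvTerm d0 n key)) c).insert key (pvTerm d0 n key)) := by
      apply pvInvC_insert d0 n _ _ key hk
      rw [hq]
      simp only [List.nil_append]
      apply pvInvC_fold d0 n _ q c hC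
      intro z hz
      rcases hzq z hz with ⟨h1, h2⟩
      exact ⟨h1, by rw [h2]; exact pvTerm_step d0 n key hesc⟩
    have hnext := pvInsert_term d0 n P d h key hk hP
    have := ih (P ++ [key]) (d.insert key (pvTerm d0 n key)) _
      (by simpa using hsplit) hnext hC'
    simp only [List.foldl_cons, hstep]
    simpa using this

theorem pvItems_nil (d0 : PySem.Dict Int Int) (n : Nat) : pvItems d0 n [] d0 := by
  simp [pvItems]

theorem pvItems_full (d0 : PySem.Dict Int Int) (n : Nat) (d : PySem.Dict Int Int)
    (h : pvItems d0 n d0.keys d) :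
    d.items = d0.items.map (fun p => (p.1, pvTerm d0 n p.1)) := by
  unfold pvItems at h
  rw [h]
  apply List.map_congr_left
  intro p hp
  have : p.1 ∈ d0.keys := by
    simp only [PySem.Dict.keys]; exact List.mem_map_of_mem hp
  simp [this]

-- ===== VERDICT (by name: the statement is the Claim_ definition above) =====
theorem simp_equiv_spec : Claim_equal_simp_equiv := by
  intro equiv _ hPre
  unfold Spec_simp_equiv simp_equiv simp_equiv_alt
  unfold Pre_simp_equiv at hPre
  set d0 := PySem.Dict.ofList equiv with hd0def
  set n := equiv.length with hn
  have hd0 : d0.keys.Nodup := PySem.Dict.nodup_keys_ofList equiv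
  have hA := pvFoldA d0 n hd0 hPre d0.keys [] d0 (by simp) (pvItems_nil d0 n)
  have hB := pvFoldB d0 n hd0 hPre d0.keys [] d0 PySem.Dict.empty (by simp)
    (pvItems_nil d0 n) (by intro x t hx; simp [PySem.Dict.get?_empty] at hx)
  simp only [List.nil_append] at hA hB
  rw [pvItems_full d0 n _ hA, pvItems_full d0 n _ hB]
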